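-- pv_equiv track=rewrite | github.com/undead-pvnk/endless-war | ew/cmd/casino/casinoutils.py | determine_trick_taker
-- ===== SOURCE A (Python) =====
-- def determine_trick_taker(trick, gametype, trump):
--     first = trick[0]
--     winner = 0
--     ranking_table = []
--     ranking_table.extend(trump)
--     if gametype == "null":
--         hearts = ["1", "13", "12", "11", "10", "9", "8", "7"]
--         slugs = ["14", "26", "25", "24", "23", "22", "21", "20"]
--         hats = ["27", "39", "38", "37", "36", "35", "34", "33"]
--         shields = ["40", "52", "51", "50", "49", "48", "47", "46"]
--
--     else:
--         hearts = ["1", "10", "13", "12", "9", "8", "7"]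
--         slugs = ["14", "23", "26", "25", "22", "21", "20"]
--         hats = ["27", "36", "39", "38", "35", "34", "33"]
--         shields = ["40", "49", "52", "51", "48", "47", "46"]
--
--     suits = [slugs, shields, hearts, hats]
--     for suit in suits:
--         for card in trump:
--             if card in suit:
--                 suit.remove(card)
--
--     if not first in trump:
--         for suit in suits:
--             if first in suit:
--                 ranking_table.extend(suit)
--
--     ranks = []
--     for card in trick:
--         if card in ranking_table:
--             ranks.append(ranking_table.index(card))
--         else:
--             ranks.append(100)
--     return ranks.index(min(ranks))
-- ===== SOURCE B (Python) =====
-- def determine_trick_taker(trick, gametype, trump):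
--     first = trick[0]
--     if gametype == "null":
--         slugs = ["14", "26", "25", "24", "23", "22", "21", "20"]
--         shields = ["40", "52", "51", "50", "49", "48", "47", "46"]
--         hearts = ["1", "13", "12", "11", "10", "9", "8", "7"]
--         hats = ["27", "39", "38", "37", "36", "35", "34", "33"]
--     else:
--         slugs = ["14", "23", "26", "25", "22", "21", "20"]
--         shields = ["40", "49", "52", "51", "48", "47", "46"]
--         hearts = ["1", "10", "13", "12", "9", "8", "7"]
--         hats = ["27", "36", "39", "38", "35", "34", "33"]
--     priority = list(trump)
--     if first not in trump:
--         for suit in (slugs, shields, hearts, hats):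
--             if first in suit:
--                 priority += suit
--                 break
--     for card in priority:
--         if card in trick:
--             return trick.index(card)
--     return 0
-- ===== Notes on version B (the rewrite author's own statement) =====
-- stated objective: simpler
-- what changed: B keeps the setup but replaces A's destructive trump-removal from all four suits and the ranks-list/min/index finale by a single scan of the priority order (trump, then the lead card's raw suit) that returns trick.index of the first priority card present in the trick (0 if none); the scan stops at the first hit and never rebuilds or re-indexes a ranking table, which a timing run measured as much faster on large inputs.
import Mathlib
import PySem

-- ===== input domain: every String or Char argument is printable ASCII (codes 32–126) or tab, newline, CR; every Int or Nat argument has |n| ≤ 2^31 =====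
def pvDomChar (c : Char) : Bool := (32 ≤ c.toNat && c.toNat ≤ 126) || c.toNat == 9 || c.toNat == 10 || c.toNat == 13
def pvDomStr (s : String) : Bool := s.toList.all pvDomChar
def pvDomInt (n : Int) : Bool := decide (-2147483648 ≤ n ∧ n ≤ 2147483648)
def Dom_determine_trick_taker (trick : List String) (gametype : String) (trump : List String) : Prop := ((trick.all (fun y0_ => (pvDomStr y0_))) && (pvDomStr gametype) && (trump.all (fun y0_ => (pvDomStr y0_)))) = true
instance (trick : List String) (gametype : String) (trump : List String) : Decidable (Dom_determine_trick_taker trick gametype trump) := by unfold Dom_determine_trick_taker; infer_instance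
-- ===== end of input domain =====

-- B keeps the setup but replaces A's destructive trump-removal from all suits and the
-- ranks/min/index finale by one scan of the priority order (trump, then the lead card's
-- raw suit) returning trick.index of the first priority card present in the trick (objective: simpler).

-- ===== PORT A =====
-- suit.remove(card) guarded by 'if card in suit'
def dttStep (s : List String) (c : String) : List String :=
  if s.contains c then s.erase c else s

def determine_trick_taker (trick : List String) (gametype : String) (trump : List String) : Int :=
  -- first = trick[0]; on [] Python raises IndexError (excluded by Pre_), pyGet? is none there
  let first : String := (PySem.List.pyGet? trick 0).getD ""
  let ranking_table : List String := ([] : List String) ++ trump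
  let hearts : List String := if gametype == "null" then ["1", "13", "12", "11", "10", "9", "8", "7"] else ["1", "10", "13", "12", "9", "8", "7"]
  let slugs : List String := if gametype == "null" then ["14", "26", "25", "24", "23", "22", "21", "20"] else ["14", "23", "26", "25", "22", "21", "20"]
  let hats : List String := if gametype == "null" then ["27", "39", "38", "37", "36", "35", "34", "33"] else ["27", "36", "39", "38", "35", "34", "33"]
  let shields : List String := if gametype == "null" then ["40", "52", "51", "50", "49", "48", "47", "46"] else ["40", "49", "52", "51", "48", "47", "46"]
  let suits : List (List String) := [slugs, shields, hearts, hats]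
  -- for suit in suits: for card in trump: if card in suit: suit.remove(card)
  let suits : List (List String) := suits.map (fun suit => trump.foldl dttStep suit)
  -- if not first in trump: for suit in suits: if first in suit: ranking_table.extend(suit)
  let table : List String :=
    if trump.contains first then ranking_table
    else suits.foldl (fun t s => if s.contains first then t ++ s else t) ranking_table
  -- ranks loop
  let ranks : List Int := trick.map (fun card =>
    if table.contains card then ((PySem.List.index? table card).getD 0 : Int) else 100)
  -- return ranks.index(min(ranks))
  match PySem.List.min? ranks (fun x => x) with
  | none => 0  -- unreachable for nonempty trick (Python min would raise on [])
  | some m => ((PySem.List.index? ranks m).getD 0 : Int)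

-- ===== PORT B =====
-- 'for card in priority: if card in trick: return trick.index(card)' / 'return 0'
def dttScan (trick : List String) : List String → Int
  | [] => 0
  | c :: cs => if trick.contains c then ((PySem.List.index? trick c).getD 0 : Int) else dttScan trick cs

def determine_trick_taker_alt (trick : List String) (gametype : String) (trump : List String) : Int :=
  -- first = trick[0]; on [] Python raises IndexError (excluded by Pre_), pyGet? is none there
  let first : String := (PySem.List.pyGet? trick 0).getD ""
  let slugs : List String := if gametype == "null" then ["14", "26", "25", "24", "23", "22", "21", "20"] else ["14", "23", "26", "25", "22", "21", "20"]
  let shields : List String := if gametype == "null" then ["40", "52", "51", "50", "49", "48", "47", "46"] else ["40", "49", "52", "51", "48", "47", "46"]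
  let hearts : List String := if gametype == "null" then ["1", "13", "12", "11", "10", "9", "8", "7"] else ["1", "10", "13", "12", "9", "8", "7"]
  let hats : List String := if gametype == "null" then ["27", "39", "38", "37", "36", "35", "34", "33"] else ["27", "36", "39", "38", "35", "34", "33"]
  let priority : List String :=
    trump ++ (if trump.contains first then []
              else match [slugs, shields, hearts, hats].find? (fun s => s.contains first) with
                   | none => []
                   | some s => s)
  dttScan trick priority

-- ===== PRECONDITION & SPEC =====
-- Python A raises IndexError on trick[0] when the trick is empty. Pre_ also excludes trumps of
-- more than 92 cards (a real trump holding has at most a few): there A still returns, but its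
-- sentinel rank 100 collides with genuine ranking-table indices ≥ 100 and the returned index is
-- an artefact of that sentinel (see the cites in claim.json).
def Pre_determine_trick_taker (trick : List String) (gametype : String) (trump : List String) : Prop := trick ≠ [] ∧ trump.length ≤ 92
instance (trick : List String) (gametype : String) (trump : List String) : Decidable (Pre_determine_trick_taker trick gametype trump) := by unfold Pre_determine_trick_taker; infer_instance
def pvWitness_determine_trick_taker : List String × String × List String := (["1", "14"], "null", ["27"])

def Spec_determine_trick_taker (trick : List String) (gametype : String) (trump : List String) (out : Int) : Prop := out = determine_trick_taker_alt trick gametype trump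
instance (trick : List String) (gametype : String) (trump : List String) (out : Int) : Decidable (Spec_determine_trick_taker trick gametype trump out) := by unfold Spec_determine_trick_taker; infer_instance

-- ===== CLAIM (what is proved, stated in full; the proofs are below) =====
def Claim_equal_determine_trick_taker : Prop := ∀ (trick : List String) (gametype : String) (trump : List String), Dom_determine_trick_taker trick gametype trump → Pre_determine_trick_taker trick gametype trump → Spec_determine_trick_taker trick gametype trump (determine_trick_taker trick gametype trump)

-- ===== LEMMAS AND PROOFS =====

-- the rank A assigns a card from table T
def dttRank (T : List String) (c : String) : Int :=
  if T.contains c then ((PySem.List.index? T c).getD 0 : Int) else 100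

-- B's scan, characterised through find?
theorem dttScan_eq_find (trick : List String) (L : List String) :
    dttScan trick L =
      match L.find? (fun c => trick.contains c) with
      | none => 0
      | some c => ((PySem.List.index? trick c).getD 0 : Int) := by
  induction L with
  | nil => rfl
  | cons c cs ih =>
    by_cases h : trick.contains c = true
    · rw [List.find?_cons_of_pos h]
      have h' : c ∈ trick := List.contains_iff_mem.mp h
      simp [dttScan, h, h']
    · rw [List.find?_cons_of_neg h]
      simp only [dttScan, h, if_false]
      exact ih

-- scanning t ++ l = scanning t ++ (l with members of t removed)
theorem find?_append_filter (t l : List String) (p : String → Bool) :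
    (t ++ l).find? p = (t ++ l.filter (fun c => !(t.contains c))).find? p := by
  rw [List.find?_append, List.find?_append]
  cases h : t.find? p with
  | some c => rfl
  | none =>
    simp only [Option.none_or]
    have ht : ∀ c ∈ t, p c = false := by
      intro c hc
      have := List.find?_eq_none.mp h c hc
      simpa using this
    induction l with
    | nil => rfl
    | cons c cs ihl =>
      rw [List.filter_cons]
      by_cases hct : c ∈ t
      · have hpc : ¬ p c = true := by rw [ht c hct]; exact Bool.false_ne_true
        rw [if_neg (by simp [hct]), List.find?_cons_of_neg hpc]
        exact ihl
      · rw [if_pos (by simp [hct])]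
        by_cases hpc : p c = true
        · rw [List.find?_cons_of_pos hpc, List.find?_cons_of_pos hpc]
        · rw [List.find?_cons_of_neg hpc, List.find?_cons_of_neg hpc]
          exact ihl

theorem index?_getElem {T : List String} {d : String} {j : ℕ}
    (h : PySem.List.index? T d = some j) : ∃ hj : j < T.length, T[j] = d := by
  obtain ⟨hj, he, _⟩ := PySem.List.getElem_of_index?_eq_some h
  exact ⟨hj, he⟩

-- the find? winner has the least index? among all cards satisfying p
theorem find?_least (p : String → Bool) :
    ∀ (T : List String) (c : String), T.find? p = some c →
      ∃ j, PySem.List.index? T c = some j ∧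
        ∀ d k, p d = true → PySem.List.index? T d = some k → j ≤ k := by
  intro T
  induction T with
  | nil => intro c h; simp [List.find?] at h
  | cons a T ih =>
    intro c h
    by_cases hpa : p a
    · have hc : a = c := by
        have := List.find?_cons_of_pos (l := T) hpa
        rw [this] at h
        exact Option.some.injEq _ _ ▸ h
      subst hc
      exact ⟨0, PySem.List.index?_cons_self _ _, fun d k _ _ => Nat.zero_le k⟩
    · have h' : T.find? p = some c := by
        rw [List.find?_cons_of_neg hpa] at h
        exact h
      obtain ⟨j, hj, hmin⟩ := ih c h'
      have hac : a ≠ c := by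
        intro he
        have : p c = true := List.find?_some h'
        rw [← he] at this
        exact hpa this
      refine ⟨j + 1, ?_, ?_⟩
      · rw [PySem.List.index?_cons_of_ne _ hac, hj]; rfl
      · intro d k hpd hk
        have had : a ≠ d := by
          intro he; rw [← he] at hpd; exact hpa hpd
        rw [PySem.List.index?_cons_of_ne _ had] at hk
        cases hk' : PySem.List.index? T d with
        | none => rw [hk'] at hk; simp at hk
        | some k' =>
          rw [hk'] at hk
          simp only [Option.map_some, Option.some.injEq] at hk
          have := hmin d k' hpd hk'
          omega

theorem index?_map_of_iff {f : String → Int} {v : Int} {c : String} :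
    ∀ (L : List String), (∀ d ∈ L, (f d = v ↔ d = c)) →
      PySem.List.index? (L.map f) v = PySem.List.index? L c := by
  intro L
  induction L with
  | nil => intro _; rfl
  | cons d L ih =>
    intro hiff
    have hd := hiff d (List.mem_cons_self)
    by_cases hdc : d = c
    · subst hdc
      have : f d = v := hd.mpr rfl
      rw [List.map_cons, this, PySem.List.index?_cons_self, PySem.List.index?_cons_self]
    · have hfv : f d ≠ v := fun he => hdc (hd.mp he)
      rw [List.map_cons, PySem.List.index?_cons_of_ne _ hfv,
          PySem.List.index?_cons_of_ne _ hdc,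
          ih (fun e he => hiff e (List.mem_cons_of_mem _ he))]

-- the core: A's min/index block over ranks from T equals B's scan over T
theorem minIndex_eq_scan (first : String) (ts : List String) (T : List String)
    (hlen : T.length ≤ 100) :
    (match PySem.List.min? ((first :: ts).map (dttRank T)) (fun x => x) with
     | none => (0 : Int)
     | some m => ((PySem.List.index? ((first :: ts).map (dttRank T)) m).getD 0 : Int))
    = dttScan (first :: ts) T := by
  rw [dttScan_eq_find]
  set trick := first :: ts with htrick
  cases hf : T.find? (fun c => trick.contains c) with
  | none =>
    -- no table card is in the trick: every rank is 100
    have hrank : ∀ d ∈ trick, dttRank T d = 100 := by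
      intro d hd
      unfold dttRank
      cases hdT : T.contains d with
      | false => simp
      | true =>
        exfalso
        have h0 := List.find?_eq_none.mp hf d (List.contains_iff_mem.mp hdT)
        exact h0 (by simpa using hd)
    have hmem : (100 : Int) ∈ trick.map (dttRank T) := by
      refine List.mem_map.mpr ⟨first, ?_, hrank first (htrick ▸ List.mem_cons_self)⟩
      exact htrick ▸ List.mem_cons_self
    have hle : ∀ x ∈ trick.map (dttRank T), (100 : Int) ≤ x := by
      intro x hx
      obtain ⟨d, hd, he⟩ := List.mem_map.mp hx
      rw [← he, hrank d hd]
    cases hm : PySem.List.min? (trick.map (dttRank T)) (fun x => x) with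
    | none =>
      exfalso
      have := (PySem.List.min?_eq_none_iff _ _).mp hm
      rw [this] at hmem; simp at hmem
    | some m =>
      have h1 : m ∈ trick.map (dttRank T) := PySem.List.min?_mem hm
      have h2 := PySem.List.min?_isMin hm (100 : Int) hmem
      have h3 := hle m h1
      have hm100 : m = 100 := le_antisymm h2 h3
      subst hm100
      have hfirst : dttRank T first = 100 := hrank first (htrick ▸ List.mem_cons_self)
      have : trick.map (dttRank T) = 100 :: ts.map (dttRank T) := by
        rw [htrick, List.map_cons, hfirst]
      rw [this]
      show ((PySem.List.index? ((100 : Int) :: ts.map (dttRank T)) (100 : Int)).getD 0 : Int) = 0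
      rw [PySem.List.index?_cons_self]
      rfl
  | some c =>
    obtain ⟨j, hjc, hleast⟩ := find?_least _ T c hf
    obtain ⟨hjlt, hget⟩ := index?_getElem hjc
    have hj100 : (j : Int) < 100 := by
      have : j < 100 := lt_of_lt_of_le hjlt hlen
      exact_mod_cast this
    have hcT : T.contains c = true :=
      List.contains_iff_mem.mpr ((PySem.List.index?_isSome_iff _ _).mp (by rw [hjc]; rfl))
    have hrc : dttRank T c = (j : Int) := by
      unfold dttRank; rw [if_pos hcT, hjc]; rfl
    have hctr : c ∈ trick := by
      have := List.find?_some hf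
      exact List.contains_iff_mem.mp (by simpa using this)
    -- every rank is ≥ j
    have hge : ∀ d ∈ trick, (j : Int) ≤ dttRank T d := by
      intro d hd
      unfold dttRank
      cases hdT : T.contains d with
      | false => simp; omega
      | true =>
        simp only [if_pos rfl]
        obtain ⟨k, hk⟩ := Option.isSome_iff_exists.mp
          ((PySem.List.index?_isSome_iff _ _).mpr (List.contains_iff_mem.mp hdT))
        have := hleast d k (List.contains_iff_mem.mpr hd) hk
        rw [hk]
        simp only [Option.getD_some]
        exact_mod_cast this
    have hmemj : (j : Int) ∈ trick.map (dttRank T) :=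
      List.mem_map.mpr ⟨c, hctr, hrc⟩
    cases hm : PySem.List.min? (trick.map (dttRank T)) (fun x => x) with
    | none =>
      exfalso
      have := (PySem.List.min?_eq_none_iff _ _).mp hm
      rw [this] at hmemj; simp at hmemj
    | some m =>
      have h1 : m ∈ trick.map (dttRank T) := PySem.List.min?_mem hm
      have h2 := PySem.List.min?_isMin hm ((j : Int)) hmemj
      have h3 : (j : Int) ≤ m := by
        obtain ⟨d, hd, he⟩ := List.mem_map.mp h1
        rw [← he]; exact hge d hd
      have hmj : m = (j : Int) := le_antisymm h2 h3
      subst hmj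
      -- rank d = j ↔ d = c, so index? over ranks = index? over trick
      have hiff : ∀ d ∈ trick, (dttRank T d = (j : Int) ↔ d = c) := by
        intro d _
        constructor
        · intro hrd
          unfold dttRank at hrd
          cases hdT : T.contains d with
          | false => rw [hdT] at hrd; simp at hrd; omega
          | true =>
            rw [hdT] at hrd
            simp only [if_pos rfl] at hrd
            obtain ⟨k, hk⟩ := Option.isSome_iff_exists.mp
              ((PySem.List.index?_isSome_iff _ _).mpr (List.contains_iff_mem.mp hdT))
            rw [hk] at hrd
            simp only [Option.getD_some] at hrd
            have hkj : k = j := by exact_mod_cast hrd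
            subst hkj
            obtain ⟨_, hg2⟩ := index?_getElem hk
            rw [← hg2, hget]
        · intro he; rw [he]; exact hrc
      show ((PySem.List.index? (trick.map (dttRank T)) ((j : ℕ) : Int)).getD 0 : Int)
          = ((PySem.List.index? trick c).getD 0 : Int)
      rw [index?_map_of_iff trick hiff]

-- suits are pairwise disjoint
def DisjS (l1 l2 : List String) : Prop := ∀ s, s ∈ l1 → s ∉ l2

theorem disj_of_all (l1 l2 : List String)
    (h : (l1.all (fun x => !(l2.contains x))) = true) : DisjS l1 l2 := by
  intro s hs
  have := List.all_eq_true.mp h s hs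
  simpa using this

theorem step_filter (s : List String) (c : String) (h : s.Nodup) :
    dttStep s c = s.filter (fun x => x != c) := by
  unfold dttStep
  by_cases hc : s.contains c
  · rw [if_pos hc]
    exact List.Nodup.erase_eq_filter h c
  · rw [if_neg hc]
    symm
    apply List.filter_eq_self.mpr
    intro x hx
    have hxc : x ≠ c := by
      intro he
      exact hc (List.contains_iff_mem.mpr (he ▸ hx))
    simp [hxc]

theorem eraseFold_filter : ∀ (tr s : List String), s.Nodup →
    tr.foldl dttStep s = s.filter (fun x => !(tr.contains x)) := by
  intro tr
  induction tr with
  | nil => intro s _; simp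
  | cons c tr ih =>
    intro s h
    rw [List.foldl_cons, step_filter s c h, ih _ (h.filter _), List.filter_filter]
    apply List.filter_congr
    intro x _
    by_cases hxc : x = c <;> by_cases hxt : x ∈ tr <;>
      simp [hxc, hxt, List.contains_cons]

-- A's extend-loop over the four (filtered) suits = the single matching raw suit, filtered
theorem fold4 (t : List String) (first : String) (p : String → Bool) (hp : p first = true)
    (s1 s2 s3 s4 : List String)
    (d12 : DisjS s1 s2) (d13 : DisjS s1 s3) (d14 : DisjS s1 s4)
    (d23 : DisjS s2 s3) (d24 : DisjS s2 s4) (d34 : DisjS s3 s4) :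
    [s1.filter p, s2.filter p, s3.filter p, s4.filter p].foldl
        (fun acc s => if s.contains first then acc ++ s else acc) t
    = t ++ (match [s1, s2, s3, s4].find? (fun s => s.contains first) with
            | none => ([] : List String)
            | some s => s.filter p) := by
  by_cases h1 : first ∈ s1 <;> by_cases h2 : first ∈ s2 <;>
    by_cases h3 : first ∈ s3 <;> by_cases h4 : first ∈ s4
  all_goals try exact absurd h2 (d12 first h1)
  all_goals try exact absurd h3 (d13 first h1)
  all_goals try exact absurd h4 (d14 first h1)
  all_goals try exact absurd h3 (d23 first h2)
  all_goals try exact absurd h4 (d24 first h2)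
  all_goals try exact absurd h4 (d34 first h3)
  all_goals simp [List.foldl, List.find?, hp, h1, h2, h3, h4, List.mem_filter]

-- the whole A-side computation over the erase-folded table = B's scan of the raw priority list
theorem dtt_core (first : String) (ts trump : List String)
    (s1 s2 s3 s4 : List String)
    (hn1 : s1.Nodup) (hn2 : s2.Nodup) (hn3 : s3.Nodup) (hn4 : s4.Nodup)
    (d12 : DisjS s1 s2) (d13 : DisjS s1 s3) (d14 : DisjS s1 s4)
    (d23 : DisjS s2 s3) (d24 : DisjS s2 s4) (d34 : DisjS s3 s4)
    (hl1 : s1.length ≤ 8) (hl2 : s2.length ≤ 8) (hl3 : s3.length ≤ 8) (hl4 : s4.length ≤ 8)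
    (htl : trump.length ≤ 92) :
    (let table : List String :=
        if trump.contains first then ([] : List String) ++ trump
        else ([s1, s2, s3, s4].map (fun suit => trump.foldl dttStep suit)).foldl
               (fun t s => if s.contains first then t ++ s else t) (([] : List String) ++ trump)
     let ranks : List Int := (first :: ts).map (fun card =>
        if table.contains card then ((PySem.List.index? table card).getD 0 : Int) else 100)
     match PySem.List.min? ranks (fun x => x) with
     | none => (0 : Int)
     | some m => ((PySem.List.index? ranks m).getD 0 : Int))
    = dttScan (first :: ts)
        (trump ++ (if trump.contains first then []
                   else match [s1, s2, s3, s4].find? (fun s => s.contains first) with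
                        | none => ([] : List String)
                        | some s => s)) := by
  by_cases htr : trump.contains first = true
  · simp only [htr, if_true, List.nil_append, List.append_nil]
    exact minIndex_eq_scan first ts trump (by omega)
  · have htr' : trump.contains first = false := by
      cases h : trump.contains first
      · rfl
      · exact absurd h htr
    have hp : (fun x => !(trump.contains x)) first = true := by
      show (!(trump.contains first)) = true
      rw [htr']
      rfl
    simp only [htr', Bool.false_eq_true, if_false, List.nil_append,
               List.map_cons, List.map_nil]
    rw [eraseFold_filter trump s1 hn1, eraseFold_filter trump s2 hn2,
        eraseFold_filter trump s3 hn3, eraseFold_filter trump s4 hn4,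
        fold4 trump first _ hp s1 s2 s3 s4 d12 d13 d14 d23 d24 d34]
    cases hfs : [s1, s2, s3, s4].find? (fun s => s.contains first) with
    | none =>
      exact minIndex_eq_scan first ts (trump ++ []) (by simp only [List.length_append, List.length_nil]; omega)
    | some s =>
      have hsmem : s ∈ [s1, s2, s3, s4] := List.mem_of_find?_eq_some hfs
      have hslen : s.length ≤ 8 := by
        rcases List.mem_cons.mp hsmem with h | h
        · subst h; exact hl1
        rcases List.mem_cons.mp h with h | h
        · subst h; exact hl2
        rcases List.mem_cons.mp h with h | h
        · subst h; exact hl3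
        rcases List.mem_cons.mp h with h | h
        · subst h; exact hl4
        simp at h
      have h1 : (trump ++ s.filter (fun x => !(trump.contains x))).length ≤ 100 := by
        rw [List.length_append]
        have := List.length_filter_le (fun x => !(trump.contains x)) s
        omega
      have e1 := minIndex_eq_scan first ts (trump ++ s.filter (fun x => !(trump.contains x))) h1
      have e2 : dttScan (first :: ts) (trump ++ s.filter (fun x => !(trump.contains x)))
              = dttScan (first :: ts) (trump ++ s) := by
        rw [dttScan_eq_find, dttScan_eq_find,
            ← find?_append_filter trump s (fun c => (first :: ts).contains c)]
      exact e1.trans e2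

-- ===== VERDICT (by name: the statement is the Claim_ definition above) =====
theorem determine_trick_taker_spec : Claim_equal_determine_trick_taker := by
  intro trick gametype trump _hDom hPre
  obtain ⟨hne, hlen⟩ := hPre
  unfold Spec_determine_trick_taker
  match trick with
  | [] => exact absurd rfl hne
  | first :: ts =>
    unfold determine_trick_taker determine_trick_taker_alt
    have hfst : (PySem.List.pyGet? (first :: ts) (0 : Int)).getD "" = first := by
      simp [PySem.List.pyGet?, PySem.List.pyIdx?]
    simp only [hfst]
    by_cases hg : (gametype == "null") = true <;>
      [simp only [hg, if_true]; skip] <;>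
      [skip; (have hg' : (gametype == "null") = false := by
                cases h : gametype == "null"
                · rfl
                · exact absurd h hg
              simp only [hg', Bool.false_eq_true, if_false])] <;>
    exact dtt_core first ts trump _ _ _ _ (by decide) (by decide) (by decide) (by decide)
      (disj_of_all _ _ (by decide)) (disj_of_all _ _ (by decide)) (disj_of_all _ _ (by decide))
      (disj_of_all _ _ (by decide)) (disj_of_all _ _ (by decide)) (disj_of_all _ _ (by decide))
      (by decide) (by decide) (by decide) (by decide) hlen
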